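-- pv_equiv track=rewrite | github.com/pparadigm/advent-of-code-2018 | 02--inv-mgmt-sys/inv-mgmt-sys.py | dictToDupesCount
-- ===== SOURCE A (Python) =====
-- def dictToDupesCount(dupeDict):
-- 	# returns a tuple of doubleDupes, tripleDupes based on the dictionary counts
-- 	doubleNotFound = True
-- 	tripleNotFound = True
-- 	doubleDupes = 0
-- 	tripleDupes = 0
-- 	for k, v in dupeDict.items():
-- 		if v == 2 and doubleNotFound:
-- 			doubleDupes += 1
-- 			doubleNotFound = False
-- 		elif v == 3 and tripleNotFound:
-- 			tripleDupes += 1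
-- 			tripleNotFound = False
-- 	return doubleDupes, tripleDupes
-- ===== SOURCE B (Python) =====
-- def dictToDupesCount(dupeDict):
-- 	# build the set of counts once, then probe it for 2 and 3
-- 	vals = set(dupeDict.values())
-- 	return (int(2 in vals), int(3 in vals))
-- ===== Notes on version B (the rewrite author's own statement) =====
-- stated objective: simpler
-- what changed: Replaces the flag-tracking loop (first-hit booleans plus counters) with materialising the values into a set once and probing it for 2 and 3.
import Mathlib
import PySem

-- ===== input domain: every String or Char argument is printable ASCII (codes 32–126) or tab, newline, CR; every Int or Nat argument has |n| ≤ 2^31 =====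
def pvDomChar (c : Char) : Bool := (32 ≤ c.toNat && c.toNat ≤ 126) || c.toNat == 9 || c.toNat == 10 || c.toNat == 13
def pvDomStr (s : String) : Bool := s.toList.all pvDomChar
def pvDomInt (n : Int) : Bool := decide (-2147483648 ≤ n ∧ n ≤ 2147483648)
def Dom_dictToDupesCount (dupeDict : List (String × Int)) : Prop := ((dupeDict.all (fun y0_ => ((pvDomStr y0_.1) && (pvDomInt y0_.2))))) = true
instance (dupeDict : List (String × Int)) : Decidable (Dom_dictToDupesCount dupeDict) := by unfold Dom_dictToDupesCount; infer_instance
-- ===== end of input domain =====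

-- B replaces A's flag-tracking loop by building the set of values once and probing it for 2 and 3 (simpler).

-- ===== PORT A =====
-- one loop step: state = (doubleNotFound, tripleNotFound, doubleDupes, tripleDupes)
def dictToDupesCountStep (st : Bool × Bool × Int × Int) (kv : String × Int) :
    Bool × Bool × Int × Int :=
  let (dnf, tnf, dd, td) := st
  if kv.2 = 2 ∧ dnf = true then (false, tnf, dd + 1, td)
  else if kv.2 = 3 ∧ tnf = true then (dnf, false, dd, td + 1)
  else (dnf, tnf, dd, td)

def dictToDupesCount (dupeDict : List (String × Int)) : Int × Int :=
  let st := dupeDict.foldl dictToDupesCountStep (true, true, 0, 0)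
  (st.2.2.1, st.2.2.2)

-- ===== PORT B =====
def dictToDupesCount_alt (dupeDict : List (String × Int)) : Int × Int :=
  let vals : PySem.Set Int := PySem.Set.ofList (dupeDict.map Prod.snd)
  ((if (2 : Int) ∈ vals then 1 else 0), (if (3 : Int) ∈ vals then 1 else 0))

-- ===== PRECONDITION & SPEC =====
def Spec_dictToDupesCount (dupeDict : List (String × Int)) (out : Int × Int) : Prop := out = dictToDupesCount_alt dupeDict
instance (dupeDict : List (String × Int)) (out : Int × Int) : Decidable (Spec_dictToDupesCount dupeDict out) := by unfold Spec_dictToDupesCount; infer_instance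

-- ===== CLAIM (what is proved, stated in full; the proofs are below) =====
def Claim_equal_dictToDupesCount : Prop := ∀ (dupeDict : List (String × Int)), Dom_dictToDupesCount dupeDict → Spec_dictToDupesCount dupeDict (dictToDupesCount dupeDict)

-- ===== LEMMAS AND PROOFS =====
theorem dictToDupesCountStep_pos2 (kv : String × Int) (dnf tnf : Bool) (dd td : Int)
    (h : kv.2 = 2 ∧ dnf = true) :
    dictToDupesCountStep (dnf, tnf, dd, td) kv = (false, tnf, dd + 1, td) := by
  simp [dictToDupesCountStep, h]

theorem dictToDupesCountStep_pos3 (kv : String × Int) (dnf tnf : Bool) (dd td : Int)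
    (h1 : ¬(kv.2 = 2 ∧ dnf = true)) (h2 : kv.2 = 3 ∧ tnf = true) :
    dictToDupesCountStep (dnf, tnf, dd, td) kv = (dnf, false, dd, td + 1) := by
  simp only [dictToDupesCountStep]
  rw [if_neg h1, if_pos h2]

theorem dictToDupesCountStep_neg (kv : String × Int) (dnf tnf : Bool) (dd td : Int)
    (h1 : ¬(kv.2 = 2 ∧ dnf = true)) (h2 : ¬(kv.2 = 3 ∧ tnf = true)) :
    dictToDupesCountStep (dnf, tnf, dd, td) kv = (dnf, tnf, dd, td) := by
  simp only [dictToDupesCountStep]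
  rw [if_neg h1, if_neg h2]

theorem dictToDupesCount_foldl (l : List (String × Int)) (dnf tnf : Bool) (dd td : Int) :
    l.foldl dictToDupesCountStep (dnf, tnf, dd, td) =
      ((dnf && !decide ((2 : Int) ∈ l.map Prod.snd)),
       (tnf && !decide ((3 : Int) ∈ l.map Prod.snd)),
       (dd + if dnf = true ∧ (2 : Int) ∈ l.map Prod.snd then 1 else 0),
       (td + if tnf = true ∧ (3 : Int) ∈ l.map Prod.snd then 1 else 0)) := by
  induction l generalizing dnf tnf dd td with
  | nil => simp
  | cons kv rest ih =>
    rw [List.foldl_cons, List.map_cons]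
    rcases Decidable.em (kv.2 = 2 ∧ dnf = true) with h1 | h1
    · rw [dictToDupesCountStep_pos2 kv dnf tnf dd td h1, ih]
      obtain ⟨hv, hd⟩ := h1
      simp only [show ((3:Int) ∈ kv.2 :: List.map Prod.snd rest) = ((3:Int) ∈ List.map Prod.snd rest) from by simp [hv],
                 show ((2:Int) ∈ kv.2 :: List.map Prod.snd rest) = True from by simp [hv]]
      simp [hd]
    · rcases Decidable.em (kv.2 = 3 ∧ tnf = true) with h2 | h2
      · rw [dictToDupesCountStep_pos3 kv dnf tnf dd td h1 h2, ih]
        obtain ⟨hv, ht⟩ := h2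
        simp only [show ((2:Int) ∈ kv.2 :: List.map Prod.snd rest) = ((2:Int) ∈ List.map Prod.snd rest) from by simp [hv],
                   show ((3:Int) ∈ kv.2 :: List.map Prod.snd rest) = True from by simp [hv]]
        simp [ht]
      · rw [dictToDupesCountStep_neg kv dnf tnf dd td h1 h2, ih]
        rcases Decidable.em (kv.2 = 2) with hv2 | hv2
        · have hd : dnf = false := by
            cases hdnf : dnf
            · rfl
            · exact absurd ⟨hv2, hdnf⟩ h1
          simp only [show ((3:Int) ∈ kv.2 :: List.map Prod.snd rest) = ((3:Int) ∈ List.map Prod.snd rest) from by simp [hv2],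
                     show ((2:Int) ∈ kv.2 :: List.map Prod.snd rest) = True from by simp [hv2]]
          simp [hd]
        · rcases Decidable.em (kv.2 = 3) with hv3 | hv3
          · have ht : tnf = false := by
              cases htnf : tnf
              · rfl
              · exact absurd ⟨hv3, htnf⟩ h2
            simp only [show ((2:Int) ∈ kv.2 :: List.map Prod.snd rest) = ((2:Int) ∈ List.map Prod.snd rest) from by simp [hv3],
                       show ((3:Int) ∈ kv.2 :: List.map Prod.snd rest) = True from by simp [hv3]]
            simp [ht]
          · simp only [show ((2:Int) ∈ kv.2 :: List.map Prod.snd rest) = ((2:Int) ∈ List.map Prod.snd rest) from by simp [List.mem_cons, Ne.symm hv2],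
                       show ((3:Int) ∈ kv.2 :: List.map Prod.snd rest) = ((3:Int) ∈ List.map Prod.snd rest) from by simp [List.mem_cons, Ne.symm hv3]]

theorem dictToDupesCount_spec_aux (dupeDict : List (String × Int)) :
    dictToDupesCount dupeDict = dictToDupesCount_alt dupeDict := by
  simp only [dictToDupesCount, dictToDupesCount_alt, dictToDupesCount_foldl,
    PySem.Set.mem_ofList]
  simp only [true_and, zero_add]

-- ===== VERDICT (by name: the statement is the Claim_ definition above) =====
theorem dictToDupesCount_spec : Claim_equal_dictToDupesCount := by
  intro d _
  exact dictToDupesCount_spec_aux d
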